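-- pv_equiv track=rewrite | github.com/JHPatchouli/TPLink_Route_ShowInfo | TPShow/TPlinkShow.py | security_encode
-- ===== SOURCE A (Python) =====
-- def security_encode(a, b, e):
--     f = ""
--     k, u = 187, 187  # Initialize k and u to 187 as in the JavaScript code
--     h = len(a)  # Length of string 'a'
--     m = len(b)  # Length of string 'b'
--     d = len(e)  # Length of string 'e'
--
--     # Determine the maximum length
--     g = max(h, m)
--
--     # Iterate over each character position up to the length 'g'
--     for l in range(g):
--         u = k = 187  # Reset k and u to 187 at each iteration
--
--         if l >= h:
--             u = ord(b[l])  # If l exceeds 'a', use character from 'b'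
--         elif l >= m:
--             k = ord(a[l])  # If l exceeds 'b', use character from 'a'
--         else:
--             k = ord(a[l])  # Otherwise, use both characters
--             u = ord(b[l])
--
--         # Append the encoded character to the result string
--         f += e[(k ^ u) % d]
--
--     return f
-- ===== SOURCE B (Python) =====
-- def security_encode(a, b, e):
--     d = len(e)
--     n = min(len(a), len(b))
--     parts = [e[(ord(x) ^ ord(y)) % d] for x, y in zip(a, b)]
--     parts += [e[(ord(c) ^ 187) % d] for c in a[n:]]
--     parts += [e[(ord(c) ^ 187) % d] for c in b[n:]]
--     return ''.join(parts)
-- ===== Notes on version B (the rewrite author's own statement) =====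
-- stated objective: alternative
-- what changed: B encodes in segments: the common prefix comes from zipping the two strings, then whichever string is longer has its leftover tail encoded against the constant 187 in a separate pass, with no index variable, no max/padding and no per-position bounds branch; A instead loops indices up to max(len) with a three-way branch.
import Mathlib
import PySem

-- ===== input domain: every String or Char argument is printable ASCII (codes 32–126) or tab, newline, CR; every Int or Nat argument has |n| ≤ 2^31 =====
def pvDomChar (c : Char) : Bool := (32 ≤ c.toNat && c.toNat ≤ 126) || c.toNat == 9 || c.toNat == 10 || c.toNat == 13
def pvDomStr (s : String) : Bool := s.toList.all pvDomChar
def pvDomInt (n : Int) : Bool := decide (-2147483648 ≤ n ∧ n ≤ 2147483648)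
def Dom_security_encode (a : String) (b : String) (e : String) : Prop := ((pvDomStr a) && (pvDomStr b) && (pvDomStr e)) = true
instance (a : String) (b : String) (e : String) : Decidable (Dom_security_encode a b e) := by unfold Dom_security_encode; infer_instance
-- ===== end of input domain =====

-- B encodes the common zipped prefix, then the leftover tail of the longer string against constant 187, in staged passes (alternative decomposition; no max/padding/index branch).


-- ===== PORT A =====
-- literal port of A: loop l over range(max(h,m)), reset k=u=187, three-way branch, append e[(k^u)%d]
def security_encode (a : String) (b : String) (e : String) : String :=
  let al := a.toList
  let bl := b.toList
  let el := e.toList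
  let h := al.length
  let m := bl.length
  let d := el.length
  let g := max h m
  let f := (List.range g).foldl (fun (f : List Char) (l : Nat) =>
    let k : Nat := 187
    let u : Nat := 187
    let ku : Nat × Nat :=
      if l ≥ h then (k, (bl[l]?.getD ' ').toNat)
      else if l ≥ m then ((al[l]?.getD ' ').toNat, u)
      else ((al[l]?.getD ' ').toNat, (bl[l]?.getD ' ').toNat)
    f ++ [el[(ku.1 ^^^ ku.2) % d]?.getD ' ']) []
  String.mk f

-- ===== PORT B =====
-- literal port of B: zip-encode the common prefix, then encode each leftover tail (at most one nonempty) against 187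
def security_encode_alt (a : String) (b : String) (e : String) : String :=
  let al := a.toList
  let bl := b.toList
  let el := e.toList
  let d := el.length
  let n := min al.length bl.length
  let parts := (al.zip bl).map (fun xy => el[(xy.1.toNat ^^^ xy.2.toNat) % d]?.getD ' ')
  let ta := (al.drop n).map (fun c => el[(c.toNat ^^^ 187) % d]?.getD ' ')
  let tb := (bl.drop n).map (fun c => el[(c.toNat ^^^ 187) % d]?.getD ' ')
  String.mk (parts ++ ta ++ tb)

-- ===== PRECONDITION & SPEC =====
-- Pre_ excludes exactly the inputs where A raises ZeroDivisionError (e empty while a or b nonempty); B raises there too.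
def Pre_security_encode (a : String) (b : String) (e : String) : Prop :=
  e.toList ≠ [] ∨ (a.toList = [] ∧ b.toList = [])
instance (a : String) (b : String) (e : String) : Decidable (Pre_security_encode a b e) := by unfold Pre_security_encode; infer_instance

def pvWitness_security_encode : String × String × String := ("admin", "pw", "abcdefgh")

def Spec_security_encode (a : String) (b : String) (e : String) (out : String) : Prop := out = security_encode_alt a b e
instance (a : String) (b : String) (e : String) (out : String) : Decidable (Spec_security_encode a b e out) := by unfold Spec_security_encode; infer_instance

-- ===== CLAIM (what is proved, stated in full; the proofs are below) =====
def Claim_equal_security_encode : Prop := ∀ (a : String) (b : String) (e : String), Dom_security_encode a b e → Pre_security_encode a b e → Spec_security_encode a b e (security_encode a b e)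

-- ===== LEMMAS AND PROOFS =====

theorem encode_lists (al bl el : List Char) :
    (List.range (max al.length bl.length)).map (fun l =>
      let ku : Nat × Nat :=
        if l ≥ al.length then (187, (bl[l]?.getD ' ').toNat)
        else if l ≥ bl.length then ((al[l]?.getD ' ').toNat, 187)
        else ((al[l]?.getD ' ').toNat, (bl[l]?.getD ' ').toNat)
      el[(ku.1 ^^^ ku.2) % el.length]?.getD ' ')
    = ((al.zip bl).map (fun xy => el[(xy.1.toNat ^^^ xy.2.toNat) % el.length]?.getD ' ')
       ++ ((al.drop (min al.length bl.length)).map (fun c => el[(c.toNat ^^^ 187) % el.length]?.getD ' '))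
       ++ ((bl.drop (min al.length bl.length)).map (fun c => el[(c.toNat ^^^ 187) % el.length]?.getD ' '))) := by
  apply List.ext_getElem
  · simp; omega
  · intro i h1 h2
    have hi : i < max al.length bl.length := by simpa using h1
    simp only [List.getElem_map, List.getElem_range]
    by_cases hia : i < al.length <;> by_cases hib : i < bl.length
    · -- common prefix: zip part
      rw [List.getElem_append_left (by simp; omega),
          List.getElem_append_left (by simp; omega)]
      simp only [List.getElem_map, List.getElem_zip]
      simp [show ¬ i ≥ al.length by omega, show ¬ i ≥ bl.length by omega,
        List.getElem?_eq_getElem hia, List.getElem?_eq_getElem hib]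
    · -- tail of a
      rw [List.getElem_append_left (by simp; omega),
          List.getElem_append_right (by simp; omega)]
      simp only [List.getElem_map, List.getElem_drop, List.length_map, List.length_zip]
      simp only [show min al.length bl.length + (i - min al.length bl.length) = i from by omega]
      simp [show ¬ i ≥ al.length by omega, show i ≥ bl.length by omega,
        List.getElem?_eq_getElem hia]
    · -- tail of b
      rw [List.getElem_append_right (by simp; omega)]
      simp only [List.getElem_map, List.getElem_drop, List.length_append, List.length_map,
        List.length_zip, List.length_drop]
      simp only [show min al.length bl.length +
        (i - (min al.length bl.length + (al.length - min al.length bl.length))) = i from by omega]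
      simp [show i ≥ al.length by omega, List.getElem?_eq_getElem hib, Nat.xor_comm]
    · omega

-- ===== VERDICT (by name: the statement is the Claim_ definition above) =====
theorem security_encode_spec : Claim_equal_security_encode := by
  intro a b e _ _
  show _ = _
  simp only [security_encode, security_encode_alt]
  rw [PySem.List.foldl_append_singleton_eq_map]
  rw [List.nil_append]
  exact congrArg String.mk (encode_lists a.toList b.toList e.toList)
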